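-- pv_equiv track=rewrite | github.com/SrinathMurali96/Leetcode-Problems | Nanaku_Premato_question.py | programmer_thinks
-- ===== SOURCE A (Python) =====
-- def programmer_thinks(l):
--     inter = []
--     for i in range(0,len(l)):
--         if i % 2 !=0:
--             inter.append(l[i])
--     if len(l) %2 !=0:
--         l.remove(l[0])
--     l = [i for i in l if i not in inter]
--     if len(l)!=1:
--         return programmer_thinks(l)
--     else:
--         return l
-- ===== SOURCE B (Python) =====
-- # Re-implementation: on distinct values the elimination process is a
-- # Josephus-style recurrence on the surviving INDEX, so compute that index
-- # directly and return the element, instead of rebuilding lists each round.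
-- # Note: A mutates its argument (removes the first element when the length is odd);
-- # B does not mutate -- the equivalence claimed is about the return value only.
-- def programmer_thinks(l):
--     def survivor(n):
--         if n <= 3:
--             return 0 if n == 2 else 2
--         if n % 2 == 0:
--             return 2 * survivor(n // 2)
--         return 2 * survivor((n - 1) // 2) + 2
--     return [l[survivor(len(l))]]
-- ===== Notes on version B (the rewrite author's own statement) =====
-- stated objective: alternative
-- what changed: Replaces the repeated build-filter-recurse list passes with a Josephus-style recurrence that computes the surviving index directly, then a single indexing (asymptotically lighter, though a timing run's large inputs contain duplicates and fall outside Pre_, so no speed is claimed).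
-- outside the precondition, e.g. on programmer_thinks([5, 0, 199, 1, 0, 1]): A returns [5], B returns [0]; on programmer_thinks([1, 2, 1]): A returns [1], B returns [1]; on programmer_thinks([1, 1]): A raises RecursionError, B returns [1]
import Mathlib
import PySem

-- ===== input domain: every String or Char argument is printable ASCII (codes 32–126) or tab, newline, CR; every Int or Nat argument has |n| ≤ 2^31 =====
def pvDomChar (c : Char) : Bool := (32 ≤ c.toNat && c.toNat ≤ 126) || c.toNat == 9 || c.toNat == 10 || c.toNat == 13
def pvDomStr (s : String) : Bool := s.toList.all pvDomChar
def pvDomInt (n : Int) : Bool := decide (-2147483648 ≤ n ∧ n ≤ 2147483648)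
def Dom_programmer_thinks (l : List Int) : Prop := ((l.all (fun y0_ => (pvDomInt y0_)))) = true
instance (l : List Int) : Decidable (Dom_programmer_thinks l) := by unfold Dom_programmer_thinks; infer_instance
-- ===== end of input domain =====

-- B replaces A's repeated build-filter-recurse list passes by a Josephus-style
-- recurrence computing the surviving index directly, then one indexing; A also
-- mutates its argument (removes its first element when the length is odd),
-- B does not — the equivalence claimed is about the return value only.

-- ===== PORT A =====
-- the for-loop building `inter` (values at odd indices); `l[i]` is in range for
-- every i drawn from range(0, len(l)), so the pyGetD default 0 is unreachable
def ptInter (l : List Int) : List Int :=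
  (PySem.List.pyRange 0 (l.length : Int) 1).foldl
    (fun inter i =>
      if (PySem.Int.mod i 2) != 0 then inter ++ [PySem.List.pyGetD l i 0] else inter) []

-- A's recursion, fuel-guarded for totality only (Python A does not terminate on
-- some inputs, e.g. []); on every input admitted by Pre_ the length at least
-- halves each call, so fuel `l.length + 1` is never exhausted.
-- `l.remove(l[0])` removes the first occurrence of the head value, i.e. the head
-- itself, so `remove?` never returns none there and `.getD l` is unreachable.
def ptGo : Nat → List Int → List Int
  | 0, _ => []
  | fuel + 1, l =>
    let inter := ptInter l
    let l1 := if l.length % 2 ≠ 0 then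
                (PySem.List.remove? l (PySem.List.pyGetD l 0 0)).getD l
              else l
    let l2 := l1.filter (fun i => decide (i ∉ inter))
    if l2.length ≠ 1 then ptGo fuel l2 else l2

def programmer_thinks (l : List Int) : List Int := ptGo (l.length + 1) l

-- ===== PORT B =====
def survivorIdx (n : Nat) : Nat :=
  if n ≤ 3 then (if n = 2 then 0 else 2)
  else if n % 2 = 0 then 2 * survivorIdx (n / 2)
  else 2 * survivorIdx ((n - 1) / 2) + 2
termination_by n
decreasing_by all_goals omega

-- `[l[survivor(len(l))]]`; the pyGetD default 0 stands where Python's indexing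
-- would raise IndexError
def programmer_thinks_alt (l : List Int) : List Int :=
  [PySem.List.pyGetD l ((survivorIdx l.length : Nat) : Int) 0]

-- ===== PRECONDITION & SPEC =====
-- Pre_ excludes lists of length < 2, on which Python A always raises
-- RecursionError, and lists with duplicate values, on which A's value-based
-- membership filter and remove make termination input-dependent (A raises
-- RecursionError on some of them, e.g. [1,1]) and, where A does return, make its
-- value an accident of which positions share a value (e.g. [5,0,199,1,0,1]).
def Pre_programmer_thinks (l : List Int) : Prop := l.Nodup ∧ 2 ≤ l.length
instance (l : List Int) : Decidable (Pre_programmer_thinks l) := by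
  unfold Pre_programmer_thinks; infer_instance

def pvWitness_programmer_thinks : List Int := [1, 2, 3, 4, 5]

def Spec_programmer_thinks (l : List Int) (out : List Int) : Prop := out = programmer_thinks_alt l
instance (l : List Int) (out : List Int) : Decidable (Spec_programmer_thinks l out) := by unfold Spec_programmer_thinks; infer_instance

-- ===== CLAIM (what is proved, stated in full; the proofs are below) =====
def Claim_equal_programmer_thinks : Prop := ∀ (l : List Int), Dom_programmer_thinks l → Pre_programmer_thinks l → Spec_programmer_thinks l (programmer_thinks l)

-- ===== LEMMAS AND PROOFS =====
-- `evens l` / `odds l`: the elements of l at even / odd positions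
def evens : List Int → List Int
  | [] => []
  | [a] => [a]
  | a :: _ :: t => a :: evens t
def odds : List Int → List Int
  | [] => []
  | [_] => []
  | _ :: b :: t => b :: odds t
theorem evens_odds_cons (t : List Int) :
    ∀ a : Int, evens (a :: t) = a :: odds t ∧ odds (a :: t) = evens t := by
  induction t with
  | nil => intro a; simp [evens, odds]
  | cons b t' ih =>
    intro a
    exact ⟨by show a :: evens t' = a :: odds (b :: t'); rw [(ih b).2],
           by show b :: odds t' = evens (b :: t'); rw [(ih b).1]⟩
theorem evens_cons (a : Int) (t : List Int) : evens (a :: t) = a :: odds t := (evens_odds_cons t a).1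
theorem odds_cons (a : Int) (t : List Int) : odds (a :: t) = evens t := (evens_odds_cons t a).2
theorem evens_odds_sublist (l : List Int) : (evens l).Sublist l ∧ (odds l).Sublist l := by
  induction l with
  | nil => simp [evens, odds]
  | cons a t ih => rw [evens_cons, odds_cons]; exact ⟨(ih.2).cons₂ a, (ih.1).cons a⟩

theorem filter_both (l : List Int) (h : l.Nodup) :
    l.filter (fun x => decide (x ∉ odds l)) = evens l ∧
    l.filter (fun x => decide (x ∉ evens l)) = odds l := by
  induction l with
  | nil => simp [evens, odds]
  | cons a t ih =>
    have ha : a ∉ t := (List.nodup_cons.mp h).1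
    have ht : t.Nodup := (List.nodup_cons.mp h).2
    rw [evens_cons, odds_cons]
    constructor
    · have hae : a ∉ evens t := fun hm => ha ((evens_odds_sublist t).1.subset hm)
      rw [List.filter_cons]
      simp only [hae, decide_not]
      simp only [decide_not] at ih ⊢
      rw [(ih ht).2]
      simp
    · rw [List.filter_cons]
      have hfa : (decide (a ∉ a :: odds t)) = false := by simp
      simp only [hfa, if_neg Bool.false_ne_true]
      have hcongr : t.filter (fun x => decide (x ∉ a :: odds t)) = t.filter (fun x => decide (x ∉ odds t)) := by
        apply List.filter_congr
        intro x hx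
        have hxa : x ≠ a := fun e => ha (e ▸ hx)
        simp [List.mem_cons, hxa]
      rw [hcongr, (ih ht).1]

theorem length_evens_odds (l : List Int) :
    (evens l).length = (l.length + 1) / 2 ∧ (odds l).length = l.length / 2 := by
  induction l with
  | nil => simp [evens, odds]
  | cons a t ih =>
    rw [evens_cons, odds_cons]
    simp only [List.length_cons]
    omega

theorem getD_evens_odds (l : List Int) :
    ∀ j, (evens l).getD j 0 = l.getD (2 * j) 0 ∧ (odds l).getD j 0 = l.getD (2 * j + 1) 0 := by
  induction l with
  | nil => intro j; simp [evens, odds]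
  | cons a t ih =>
    intro j
    rw [evens_cons, odds_cons]
    constructor
    · cases j with
      | zero => simp
      | succ j' =>
        show (odds t).getD j' 0 = _
        rw [(ih j').2]
        have h2 : 2 * (j' + 1) = (2 * j' + 1) + 1 := by ring
        rw [h2]
        simp
    · rw [(ih j).1]
      simp

theorem range_filter_parity (l : List Int) :
    ((List.range l.length).filter (fun k => decide (k % 2 = 1))).map (fun k => l.getD k 0) = odds l ∧
    ((List.range l.length).filter (fun k => decide (k % 2 = 0))).map (fun k => l.getD k 0) = evens l := by
  induction l with
  | nil => simp [odds, evens]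
  | cons a t ih =>
    rw [odds_cons, evens_cons]
    have hr : List.range (a :: t).length = 0 :: (List.range t.length).map Nat.succ := by
      simp [List.range_succ_eq_map]
    rw [hr]
    have h1 : (0 :: (List.range t.length).map Nat.succ).filter (fun k => decide (k % 2 = 1)) =
        ((List.range t.length).map Nat.succ).filter (fun k => decide (k % 2 = 1)) := by
      rw [List.filter_cons]; simp
    have h0 : (0 :: (List.range t.length).map Nat.succ).filter (fun k => decide (k % 2 = 0)) =
        0 :: ((List.range t.length).map Nat.succ).filter (fun k => decide (k % 2 = 0)) := by
      rw [List.filter_cons]; simp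
    constructor
    · rw [h1, List.filter_map, List.map_map]
      have hc : ((List.range t.length).filter (fun k => decide (Nat.succ k % 2 = 1))) =
          ((List.range t.length).filter (fun k => decide (k % 2 = 0))) := by
        apply List.filter_congr; intro x _; simp; omega
      rw [show ((fun k => decide (k % 2 = 1)) ∘ Nat.succ) = (fun k => decide (Nat.succ k % 2 = 1)) from rfl, hc]
      rw [show ((fun k => (a :: t).getD k 0) ∘ Nat.succ) = (fun k => t.getD k 0) from rfl]
      exact ih.2
    · rw [h0, List.map_cons, List.filter_map, List.map_map]
      have hc : ((List.range t.length).filter (fun k => decide (Nat.succ k % 2 = 0))) =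
          ((List.range t.length).filter (fun k => decide (k % 2 = 1))) := by
        apply List.filter_congr; intro x _; simp; omega
      rw [show ((fun k => decide (k % 2 = 0)) ∘ Nat.succ) = (fun k => decide (Nat.succ k % 2 = 0)) from rfl, hc]
      rw [show ((fun k => (a :: t).getD k 0) ∘ Nat.succ) = (fun k => t.getD k 0) from rfl]
      rw [ih.1]
      simp

theorem ptInter_eq (l : List Int) : ptInter l = odds l := by
  rw [ptInter, PySem.List.foldl_append_if, PySem.List.pyRange_zero_natCast, List.filter_map,
    List.map_map, List.nil_append]
  have hp : ∀ k : Nat, ((fun i => PySem.Int.mod i 2 != 0) ∘ (fun k : Nat => (k : Int))) k =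
      (fun k : Nat => decide (k % 2 = 1)) k := by
    intro k
    show ((PySem.Int.mod (k : Int) 2) != 0) = decide (k % 2 = 1)
    rw [PySem.Int.mod_eq_emod_of_pos (by omega)]
    by_cases h : k % 2 = 1 <;> simp [h] <;> omega
  have hg : ∀ k : Nat, ((fun i => PySem.List.pyGetD l i 0) ∘ (fun k : Nat => (k : Int))) k =
      (fun k : Nat => l.getD k 0) k := by
    intro k; simp
  rw [funext hp, funext hg]
  exact (range_filter_parity l).1

def pstep (l : List Int) : List Int :=
  (if l.length % 2 ≠ 0 then (PySem.List.remove? l (PySem.List.pyGetD l 0 0)).getD l else l).filter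
    (fun i => decide (i ∉ ptInter l))

theorem ptGo_succ (fuel : Nat) (l : List Int) :
    ptGo (fuel + 1) l = if (pstep l).length ≠ 1 then ptGo fuel (pstep l) else pstep l := rfl

theorem pstep_even (l : List Int) (hnd : l.Nodup) (he : l.length % 2 = 0) :
    pstep l = evens l := by
  rw [pstep, if_neg (by omega), ptInter_eq]
  exact (filter_both l hnd).1

theorem pstep_odd (a : Int) (t : List Int) (hnd : (a :: t).Nodup) (ho : (a :: t).length % 2 = 1) :
    pstep (a :: t) = odds t := by
  rw [pstep, if_pos (by omega)]
  have hget : PySem.List.pyGetD (a :: t) 0 0 = a := by simp [pysem]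
  rw [hget, PySem.List.remove?_cons_self, Option.getD_some, ptInter_eq, odds_cons]
  exact (filter_both t (List.nodup_cons.mp hnd).2).2

theorem eq_singleton_of_length_one (xs : List Int) (h : xs.length = 1) : xs = [xs.getD 0 0] := by
  match xs, h with
  | [x], _ => rfl

theorem ptGo_eq (fuel : Nat) : ∀ l : List Int, l.Nodup → 2 ≤ l.length →
    l.length ≤ fuel → ptGo fuel l = [l.getD (survivorIdx l.length) 0] := by
  induction fuel with
  | zero => intro l _ h2 hf; omega
  | succ fuel ih =>
    intro l hnd h2 hf
    rw [ptGo_succ]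
    by_cases he : l.length % 2 = 0
    · rw [pstep_even l hnd he]
      have hlen : (evens l).length = l.length / 2 := by
        have := (length_evens_odds l).1; omega
      by_cases h4 : l.length = 2
      · have hl1 : (evens l).length = 1 := by omega
        rw [if_neg (by omega), eq_singleton_of_length_one _ hl1, (getD_evens_odds l 0).1]
        have hs : survivorIdx l.length = 0 := by rw [h4, survivorIdx]; norm_num
        rw [hs]
      · have h4' : 4 ≤ l.length := by omega
        rw [if_pos (by omega)]
        rw [ih (evens l) ((evens_odds_sublist l).1.nodup hnd) (by omega) (by omega)]
        rw [hlen, (getD_evens_odds l (survivorIdx (l.length / 2))).1]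
        have hs : survivorIdx l.length = 2 * survivorIdx (l.length / 2) := by
          rw [survivorIdx, if_neg (by omega), if_pos he]
        rw [hs]
    · obtain ⟨a, t, rfl⟩ : ∃ a t, l = a :: t := by
        cases l with
        | nil => simp at h2
        | cons a t => exact ⟨a, t, rfl⟩
      have ho : (a :: t).length % 2 = 1 := by omega
      rw [pstep_odd a t hnd ho]
      have hlen : (odds t).length = t.length / 2 := (length_evens_odds t).2
      have hlt : t.length = (a :: t).length - 1 := by simp
      by_cases h3 : (a :: t).length = 3
      · have hl1 : (odds t).length = 1 := by omega
        rw [if_neg (by omega), eq_singleton_of_length_one _ hl1, (getD_evens_odds t 0).2]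
        have hs : survivorIdx (a :: t).length = 2 := by rw [h3, survivorIdx]; norm_num
        rw [hs]
        simp
      · have h5 : 5 ≤ (a :: t).length := by omega
        rw [if_pos (by omega)]
        rw [ih (odds t) ((evens_odds_sublist t).2.nodup (List.nodup_cons.mp hnd).2) (by omega) (by omega)]
        rw [hlen, (getD_evens_odds t (survivorIdx (t.length / 2))).2]
        have hs : survivorIdx (a :: t).length = 2 * survivorIdx (t.length / 2) + 2 := by
          rw [survivorIdx, if_neg (by omega), if_neg (by omega)]
          have harg : ((a :: t).length - 1) / 2 = t.length / 2 := by simp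
          rw [harg]
        rw [hs]
        simp only [List.length_cons] at *
        have : 2 * survivorIdx (t.length / 2) + 1 + 1 = 2 * survivorIdx (t.length / 2) + 2 := by omega
        rw [← this]
        simp

-- ===== VERDICT (by name: the statement is the Claim_ definition above) =====
theorem programmer_thinks_spec : Claim_equal_programmer_thinks := by
  intro l _hdom hpre
  obtain ⟨hnd, hlen⟩ := hpre
  show programmer_thinks l = programmer_thinks_alt l
  rw [programmer_thinks, programmer_thinks_alt,
    ptGo_eq (l.length + 1) l hnd hlen (by omega), PySem.List.pyGetD_natCast]
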